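-- pv_equiv track=rewrite | github.com/SuzanneLeonore/Projet_Electromob | Chemin_QRcode/detectionPlus/Procedure_final (1).py | disponible
-- ===== SOURCE A (Python) =====
-- def disponible(l):
--     out = []
--     for i in range(len(l)):
--         if not l[i]:
--             out.append(i)
--
--     if out != [] :
--         return out[0], len(l)
--
--     else :
--         return -1, 0
-- ===== SOURCE B (Python) =====
-- def disponible(l):
--     for i, v in enumerate(l):
--         if not v:
--             return i, len(l)
--     return -1, 0
-- ===== Notes on version B (the rewrite author's own statement) =====
-- stated objective: faster
-- what changed: B early-exits at the first falsy element via enumerate instead of collecting every falsy index into a list and taking its head after a full pass.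
import Mathlib
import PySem

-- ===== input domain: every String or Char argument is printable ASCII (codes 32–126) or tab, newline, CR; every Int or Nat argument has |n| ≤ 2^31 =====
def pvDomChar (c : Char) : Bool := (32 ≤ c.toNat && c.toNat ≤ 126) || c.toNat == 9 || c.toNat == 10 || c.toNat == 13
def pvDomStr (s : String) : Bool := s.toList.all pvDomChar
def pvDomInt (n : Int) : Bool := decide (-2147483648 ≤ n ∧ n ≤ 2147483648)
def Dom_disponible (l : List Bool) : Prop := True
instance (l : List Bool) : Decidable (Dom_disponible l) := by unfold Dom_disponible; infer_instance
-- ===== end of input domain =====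

-- B early-exits on the first falsy element instead of collecting all falsy indices (idiomatic rewrite; same cost class).

-- ===== PORT A =====
-- l[i] is read with pyGetD: every i drawn from range(len(l)) is in range, so this is exact.
def disponible (l : List Bool) : Int × Int :=
  let out := (PySem.List.pyRange 0 (l.length : Int) 1).foldl
    (fun out i => if PySem.List.pyGetD l i true = false then out ++ [i] else out) []
  if out ≠ [] then (out.headD 0, (l.length : Int)) else (-1, 0)

-- ===== PORT B =====
def disponibleGo (n : Int) : List Bool → Int → Int × Int
  | [], _ => (-1, 0)
  | b :: rest, i => if b then disponibleGo n rest (i + 1) else (i, n)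

def disponible_alt (l : List Bool) : Int × Int :=
  disponibleGo (l.length : Int) l 0

-- ===== PRECONDITION & SPEC =====
def Spec_disponible (l : List Bool) (out : Int × Int) : Prop := out = disponible_alt l
instance (l : List Bool) (out : Int × Int) : Decidable (Spec_disponible l out) := by unfold Spec_disponible; infer_instance

-- ===== CLAIM (what is proved, stated in full; the proofs are below) =====
def Claim_equal_disponible : Prop := ∀ (l : List Bool), Dom_disponible l → Spec_disponible l (disponible l)

-- ===== LEMMAS AND PROOFS =====

/-- The list of falsy indices of a suffix, offset by `k`. -/
def fals : List Bool → Int → List Int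
  | [], _ => []
  | b :: rest, k => if b = false then k :: fals rest (k + 1) else fals rest (k + 1)

lemma foldA (L : List Bool) (s : List Bool) : ∀ (k : Nat), s = L.drop k →
    ∀ (acc : List Int),
    (PySem.List.pyRange (k : Int) (L.length : Int) 1).foldl
      (fun out i => if PySem.List.pyGetD L i true = false then out ++ [i] else out) acc
    = acc ++ fals s (k : Int) := by
  induction s with
  | nil =>
    intro k hk acc
    have hlen : L.length ≤ k := by
      by_contra h
      have := List.drop_eq_nil_iff.mp hk.symm
      omega
    rw [PySem.List.pyRange_one_eq_nil (by exact_mod_cast hlen)]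
    simp [fals]
  | cons b rest ih =>
    intro k hk acc
    have hklt : k < L.length := by
      by_contra h
      rw [List.drop_eq_nil_of_le (by omega)] at hk
      exact List.cons_ne_nil _ _ hk
    have hget : L[k]'hklt = b := by
      have h0 : (L.drop k)[0]'(by simp; omega) = b := by
        simp only [← hk]; rfl
      simpa using h0
    have hgd : PySem.List.pyGetD L (k : Int) true = b := by
      rw [PySem.List.pyGetD_natCast]
      simp [List.getD, hklt, hget]
    have hrest : rest = L.drop (k + 1) := by
      have : L.drop (k + 1) = (L.drop k).drop 1 := by
        rw [List.drop_drop, Nat.add_comm]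
      rw [this, ← hk]; simp
    rw [PySem.List.pyRange_one_cons (by exact_mod_cast hklt)]
    simp only [List.foldl_cons, hgd]
    have hc : (k : Int) + 1 = ((k + 1 : Nat) : Int) := by push_cast; ring
    cases b with
    | false =>
      simp only [reduceIte]
      rw [hc, ih (k + 1) hrest, show fals (false :: rest) ((k : Nat) : Int)
        = (k : Int) :: fals rest ((k : Int) + 1) from rfl, hc]
      rw [List.append_assoc]
      rfl
    | true =>
      rw [if_neg (by simp), hc, ih (k + 1) hrest, show fals (true :: rest) ((k : Nat) : Int)
        = fals rest ((k : Int) + 1) from rfl, hc]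

lemma combined (n : Int) (s : List Bool) : ∀ (k : Int),
    (if fals s k ≠ [] then ((fals s k).headD 0, n) else ((-1 : Int), (0 : Int)))
    = disponibleGo n s k := by
  induction s with
  | nil => intro k; simp [fals, disponibleGo]
  | cons b rest ih =>
    intro k
    cases b with
    | false => simp [fals, disponibleGo]
    | true => simpa [fals, disponibleGo] using ih (k + 1)

-- ===== VERDICT (by name: the statement is the Claim_ definition above) =====
theorem disponible_spec : Claim_equal_disponible := by
  intro l _
  show disponible l = disponible_alt l
  unfold disponible disponible_alt
  rw [show ((0 : Int) = ((0 : Nat) : Int)) from rfl, foldA l l 0 (by simp) []]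
  simpa using combined (l.length : Int) l 0
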